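-- pv_equiv track=rewrite | github.com/aqinsh/jiyongfeng.github.io | test.py | removNb2
-- ===== SOURCE A (Python) =====
-- def removNb2(n):
--     total = sum(range(1, n+1))
--     s = []
--     for i in range(1, n+1):
--         mod_j = (total - i) % (i + 1)
--         j = (total - i) // (i + 1)
--         if mod_j == 0 and j < n:
--             s.append((i, j))
--     return s
-- ===== SOURCE B (Python) =====
-- def removNb2(n):
--     # Two-pointer search over (a, b) with a <= b, then mirror the strict pairs.
--     total = n * (n + 1) // 2
--     a, b = 1, n
--     left = []
--     while a <= b:
--         f = a * b + a + b - total
--         if f == 0: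
--             left.append((a, b))
--             a += 1
--             b -= 1
--         elif f < 0:
--             a += 1
--         else:
--             b -= 1
--     return left + [(y, x) for (x, y) in reversed(left) if x != y]
-- ===== Notes on version B (the rewrite author's own statement) =====
-- stated objective: alternative
-- what changed: Replaces A's per-i divisibility scan over 1..n (with a recomputed running sum) by a closed-form total n(n+1)/2 and an inward-moving two-pointer search that collects each unordered pair (a,b), a<=b, once and then mirrors the strict pairs to produce both orientations.
-- intended difference: For n = 1 A returns [(1, 0)], a pair containing 0 which is not one of the numbers 1..n being considered, while B returns [] — the intended value, since no valid pair of numbers from 1..1 exists. — e.g. on removNb2(1): A returns [(1, 0)], B returns []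
import Mathlib
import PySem

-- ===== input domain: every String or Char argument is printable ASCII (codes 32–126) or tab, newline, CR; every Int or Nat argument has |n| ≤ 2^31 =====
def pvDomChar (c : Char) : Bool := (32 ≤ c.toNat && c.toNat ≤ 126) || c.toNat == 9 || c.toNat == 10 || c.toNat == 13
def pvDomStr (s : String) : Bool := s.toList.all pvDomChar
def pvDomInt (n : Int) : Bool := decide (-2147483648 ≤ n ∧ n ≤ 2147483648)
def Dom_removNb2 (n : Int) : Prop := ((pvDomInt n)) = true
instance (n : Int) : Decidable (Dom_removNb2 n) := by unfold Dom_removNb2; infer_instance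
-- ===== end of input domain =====

-- B replaces A's linear divisibility scan by a closed-form total and a two-pointer search
-- (alternative algorithm, similar cost); equivalence is about the return value (nothing is mutated).

-- ===== PORT A =====
def removNb2 (n : Int) : List (Int × Int) :=
  let total := (PySem.List.pyRange 1 (n+1) 1).sum
  (PySem.List.pyRange 1 (n+1) 1).foldl
    (fun s i =>
      let mod_j := PySem.Int.mod (total - i) (i + 1)
      let j := PySem.Int.floordiv (total - i) (i + 1)
      if mod_j = 0 ∧ j < n then s ++ [(i, j)] else s) []

-- ===== PORT B =====
-- the `while a <= b` two-pointer loop of Source B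
def twoPtrB (total a b : Int) : List (Int × Int) :=
  if h : a ≤ b then
    let f := a * b + a + b - total
    if f = 0 then (a, b) :: twoPtrB total (a + 1) (b - 1)
    else if f < 0 then twoPtrB total (a + 1) b
    else twoPtrB total a (b - 1)
  else []
termination_by (b + 1 - a).toNat
decreasing_by all_goals omega

def removNb2_alt (n : Int) : List (Int × Int) :=
  let total := PySem.Int.floordiv (n * (n + 1)) 2
  let left := twoPtrB total 1 n
  left ++ ((left.reverse.filter (fun p => p.1 ≠ p.2)).map (fun p => (p.2, p.1)))

-- ===== PRECONDITION & SPEC =====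
-- For n = 1 A returns [(1, 0)], a pair containing 0 which is not one of the numbers 1..n being
-- considered, while B returns [] — the intended value, since no valid pair of numbers from 1..1 exists.
def D_removNb2 (n : Int) : Prop := n = 1
instance (n : Int) : Decidable (D_removNb2 n) := by unfold D_removNb2; infer_instance
def Spec_removNb2 (n : Int) (out : List (Int × Int)) : Prop := ¬ D_removNb2 n → out = removNb2_alt n
instance (n : Int) (out : List (Int × Int)) : Decidable (Spec_removNb2 n out) := by unfold Spec_removNb2; infer_instance
def pvDiffWitness_removNb2 : Int := 1
def pvDiffWitnessOut_removNb2 : (List (Int × Int)) × (List (Int × Int)) := ([(1, 0)], [])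

-- ===== CLAIM (what is proved, stated in full; the proofs are below) =====
def Claim_unchanged_removNb2 : Prop := ∀ (n : Int), Dom_removNb2 n → Spec_removNb2 n (removNb2 n)
def Claim_changed_removNb2 : Prop := Dom_removNb2 (pvDiffWitness_removNb2) ∧ D_removNb2 (pvDiffWitness_removNb2) ∧ removNb2 (pvDiffWitness_removNb2) = pvDiffWitnessOut_removNb2.1 ∧ removNb2_alt (pvDiffWitness_removNb2) = pvDiffWitnessOut_removNb2.2 ∧ pvDiffWitnessOut_removNb2.1 ≠ pvDiffWitnessOut_removNb2.2
def Claim_exact_removNb2 : Prop := ∀ (n : Int), Dom_removNb2 n → D_removNb2 n → removNb2 n ≠ removNb2_alt n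

-- ===== LEMMAS AND PROOFS =====

def yOf (T x : Int) : Int := (T + 1) / (x + 1) - 1

theorem sum_range_eq (k : Nat) : 2 * ((PySem.List.pyRange 1 ((k : Int) + 1) 1).sum) = (k : Int) * ((k : Int) + 1) := by
  induction k with
  | zero => simp [PySem.List.pyRange_one_eq_nil]
  | succ m ih =>
    push_cast
    rw [show ((m : Int) + 1 + 1) = ((m : Int) + 1) + 1 by ring,
        PySem.List.pyRange_one_succ_right (a := 1) (b := (m : Int) + 1) (by omega)]
    simp only [List.sum_append, List.sum_cons, List.sum_nil]
    push_cast at ih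
    ring_nf
    ring_nf at ih
    omega

theorem div_char (T x y : Int) (hx : 1 ≤ x) :
    ((T + 1) % (x + 1) = 0 ∧ y = yOf T x) ↔ (x + 1) * (y + 1) = T + 1 := by
  unfold yOf
  constructor
  · rintro ⟨h1, h2⟩
    have hd : (x + 1) ∣ (T + 1) := Int.dvd_of_emod_eq_zero h1
    have := Int.ediv_mul_cancel hd
    subst h2
    nlinarith [this]
  · intro h
    have hd : (x + 1) ∣ (T + 1) := ⟨y + 1, h.symm⟩
    constructor
    · exact Int.emod_eq_zero_of_dvd hd
    · have hne : x + 1 ≠ 0 := by omega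
      have : (T + 1) / (x + 1) = y + 1 := by
        rw [← h, Int.mul_ediv_cancel_left _ hne]
      omega

theorem y_nonneg (T x y : Int) (hx : 1 ≤ x) (hT : 0 ≤ T) (h : (x + 1) * (y + 1) = T + 1) : 0 ≤ y := by
  nlinarith

theorem y_mono (T x y x' y' : Int) (hx : 1 ≤ x) (hT : 0 ≤ T) (hlt : x < x')
    (h : (x + 1) * (y + 1) = T + 1) (h' : (x' + 1) * (y' + 1) = T + 1) : y' < y := by
  have hy : 0 ≤ y := y_nonneg T x y hx hT h
  have hy' : 0 ≤ y' := y_nonneg T x' y' (by omega) hT h'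
  nlinarith

def specA (n T : Int) : List (Int × Int) :=
  (PySem.List.pyRange 1 (n+1) 1).filterMap
    (fun i => if (T + 1) % (i + 1) = 0 ∧ yOf T i < n then some (i, yOf T i) else none)

theorem foldl_if_filterMap {α β : Type} (c : α → Prop) [DecidablePred c] (g : α → β)
    (l : List α) (acc : List β) :
    l.foldl (fun s i => if c i then s ++ [g i] else s) acc
      = acc ++ l.filterMap (fun i => if c i then some (g i) else none) := by
  induction l generalizing acc with
  | nil => simp
  | cons x xs ih =>
    simp only [List.foldl_cons, List.filterMap_cons]
    by_cases h : c x
    · rw [if_pos h, if_pos h, ih]; simp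
    · rw [if_neg h, if_neg h, ih]

theorem removNb2_eq_specA (n : Int) (hn : 0 ≤ n) : removNb2 n = specA n (n * (n + 1) / 2) := by
  unfold removNb2
  set T : Int := n * (n + 1) / 2 with hT
  have hTn : 2 * T = n * (n + 1) := by
    obtain ⟨r, hr⟩ := Int.even_mul_succ_self n
    rw [hT]
    generalize n * (n + 1) = m at hr ⊢
    omega
  have htot : (PySem.List.pyRange 1 (n+1) 1).sum = T := by
    have := sum_range_eq n.toNat
    rw [Int.toNat_of_nonneg hn] at this
    omega
  simp only [htot]
  rw [PySem.List.foldl_congr_mem' (PySem.List.pyRange 1 (n+1) 1) _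
      (fun s i => if (T + 1) % (i + 1) = 0 ∧ yOf T i < n then s ++ [(i, yOf T i)] else s) []
      ?_]
  · exact foldl_if_filterMap (fun i => (T + 1) % (i + 1) = 0 ∧ yOf T i < n)
      (fun i => (i, yOf T i)) _ []
  · intro x hx acc
    have hx1 : 1 ≤ x := (PySem.List.mem_pyRange_one.mp hx).1
    have hpos : (0 : Int) < x + 1 := by omega
    have hmod : PySem.Int.mod (T - x) (x + 1) = (T + 1) % (x + 1) := by
      rw [PySem.Int.mod_eq_emod_of_pos hpos, show T - x = (T + 1) - (x + 1) by ring,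
        Int.sub_emod_right]
    have hdiv : PySem.Int.floordiv (T - x) (x + 1) = yOf T x := by
      rw [PySem.Int.floordiv_eq_ediv_of_pos hpos, show T - x = (T + 1) + (-1) * (x + 1) by ring,
        Int.add_mul_ediv_right _ _ (by omega : x + 1 ≠ 0)]
      unfold yOf; ring
    simp only [hmod, hdiv]

def pairsIn (T a b : Int) : List (Int × Int) :=
  (PySem.List.pyRange a (b+1) 1).filterMap
    (fun x => if (T + 1) % (x + 1) = 0 ∧ x ≤ yOf T x ∧ yOf T x ≤ b then some (x, yOf T x) else none)

theorem pairsIn_nil (T a b : Int) (h : b < a) : pairsIn T a b = [] := by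
  unfold pairsIn
  rw [PySem.List.pyRange_one_eq_nil (by omega)]
  rfl

-- a is a valid pair head: characterisation used for f = 0
theorem head_valid (T a b : Int) (ha : 1 ≤ a) (heq : (a + 1) * (b + 1) = T + 1) :
    (T + 1) % (a + 1) = 0 ∧ b = yOf T a := (div_char T a b ha).mpr heq

theorem twoPtr_eq (T : Int) (hT : 0 ≤ T) :
    ∀ (k : Nat) (a b : Int), 1 ≤ a → (b + 1 - a).toNat ≤ k → twoPtrB T a b = pairsIn T a b := by
  intro k
  induction k with
  | zero =>
    intro a b ha hk
    rw [twoPtrB, dif_neg (by omega : ¬ a ≤ b), pairsIn_nil T a b (by omega)]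
  | succ m ih =>
    intro a b ha hk
    by_cases hab : a ≤ b
    case neg => rw [twoPtrB, dif_neg hab, pairsIn_nil T a b (by omega)]
    rw [twoPtrB, dif_pos hab]
    simp only []
    by_cases hf0 : a * b + a + b - T = 0
    · rw [if_pos hf0]
      have heq : (a + 1) * (b + 1) = T + 1 := by ring_nf; ring_nf at hf0; omega
      obtain ⟨hdvd, hy⟩ := head_valid T a b ha heq
      rw [ih (a+1) (b-1) (by omega) (by omega)]
      -- now: (a, b) :: pairsIn T (a+1) (b-1) = pairsIn T a b
      unfold pairsIn
      rw [PySem.List.pyRange_one_cons (by omega : a < b + 1), List.filterMap_cons]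
      rw [if_pos ⟨hdvd, by omega, by omega⟩]
      simp only [← hy]
      by_cases hab' : a = b
      · subst hab'
        rw [PySem.List.pyRange_one_eq_nil (by omega), PySem.List.pyRange_one_eq_nil (by omega)]
        simp
      · -- a < b
        have hab2 : a < b := lt_of_le_of_ne hab hab'
        rw [PySem.List.pyRange_one_append (a+1) b (b+1) (by omega) (by omega),
          List.filterMap_append]
        have hone : PySem.List.pyRange b (b+1) 1 = [b] := by
          rw [PySem.List.pyRange_one_cons (by omega), PySem.List.pyRange_one_eq_nil (by omega)]
        rw [hone]
        have hnb : ¬ ((T + 1) % (b + 1) = 0 ∧ b ≤ yOf T b ∧ yOf T b ≤ b) := by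
          rintro ⟨h1, h2, _⟩
          have heqb : (b + 1) * (yOf T b + 1) = T + 1 :=
            (div_char T b (yOf T b) (by omega)).mp ⟨h1, rfl⟩
          have := y_mono T a (yOf T a) b (yOf T b) ha hT hab2 (hy ▸ heq) heqb
          omega
        simp only [List.filterMap_cons, List.filterMap_nil, if_neg hnb, List.append_nil]
        have hrange : b - 1 + 1 = b := by omega
        rw [hrange]
        congr 1
        apply List.filterMap_congr
        intro x hx
        have hx' : a + 1 ≤ x ∧ x < b := by
          have := PySem.List.mem_pyRange_one.mp hx; omega
        refine if_congr ?_ rfl rfl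
        constructor
        · rintro ⟨u, v, w⟩
          exact ⟨u, v, by omega⟩
        · rintro ⟨u, v, w⟩
          have heqx : (x + 1) * (yOf T x + 1) = T + 1 :=
            (div_char T x (yOf T x) (by omega)).mp ⟨u, rfl⟩
          have hlt : yOf T x < b :=
            y_mono T a b x (yOf T x) ha hT (by omega) heq heqx
          exact ⟨u, v, by omega⟩
    · rw [if_neg hf0]
      by_cases hfneg : a * b + a + b - T < 0
      · rw [if_pos hfneg, ih (a+1) b (by omega) (by omega)]
        -- pairsIn T (a+1) b = pairsIn T a b : head a contributes none
        unfold pairsIn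
        rw [PySem.List.pyRange_one_cons (by omega : a < b + 1), List.filterMap_cons]
        have hna : ¬ ((T + 1) % (a + 1) = 0 ∧ a ≤ yOf T a ∧ yOf T a ≤ b) := by
          rintro ⟨h1, h2, h3⟩
          have heqa : (a + 1) * (yOf T a + 1) = T + 1 :=
            (div_char T a (yOf T a) ha).mp ⟨h1, rfl⟩
          nlinarith
        rw [if_neg hna]
      · rw [if_neg hfneg, ih a (b-1) ha (by omega)]
        have hfpos : 0 < a * b + a + b - T := by omega
        -- pairsIn T a (b-1) = pairsIn T a b
        unfold pairsIn
        have hrange : b - 1 + 1 = b := by omega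
        rw [hrange, PySem.List.pyRange_one_succ_right (by omega : a ≤ b),
          List.filterMap_append]
        have hnb : ¬ ((T + 1) % (b + 1) = 0 ∧ b ≤ yOf T b ∧ yOf T b ≤ b) := by
          rintro ⟨h1, h2, h3⟩
          have heqb : (b + 1) * (yOf T b + 1) = T + 1 :=
            (div_char T b (yOf T b) (by omega)).mp ⟨h1, rfl⟩
          have : yOf T b = b := by omega
          rw [this] at heqb
          nlinarith
        simp only [List.filterMap_cons, List.filterMap_nil, if_neg hnb, List.append_nil]
        apply List.filterMap_congr
        intro x hx
        have hx' : a ≤ x ∧ x < b := by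
          have := PySem.List.mem_pyRange_one.mp hx; omega
        refine if_congr ?_ rfl rfl
        constructor
        · rintro ⟨u, v, w⟩
          exact ⟨u, v, by omega⟩
        · rintro ⟨u, v, w⟩
          have heqx : (x + 1) * (yOf T x + 1) = T + 1 :=
            (div_char T x (yOf T x) (by omega)).mp ⟨u, rfl⟩
          have hyb : yOf T x ≠ b := by
            intro he
            rw [he] at heqx
            nlinarith
          exact ⟨u, v, by omega⟩

theorem mem_pairsIn (T a b : Int) (ha : 1 ≤ a) (p : Int × Int) :
    p ∈ pairsIn T a b ↔ a ≤ p.1 ∧ (p.1 + 1) * (p.2 + 1) = T + 1 ∧ p.1 ≤ p.2 ∧ p.2 ≤ b := by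
  unfold pairsIn
  rw [List.mem_filterMap]
  constructor
  · rintro ⟨x, hx, hfx⟩
    rw [PySem.List.mem_pyRange_one] at hx
    split_ifs at hfx with hc
    · obtain ⟨h1, h2, h3⟩ := hc
      cases hfx
      have heq := (div_char T x (yOf T x) (by omega)).mp ⟨h1, rfl⟩
      exact ⟨by omega, heq, h2, h3⟩
  · rintro ⟨h1, heq, h2, h3⟩
    refine ⟨p.1, PySem.List.mem_pyRange_one.mpr ⟨h1, by omega⟩, ?_⟩
    obtain ⟨hd, hy⟩ := (div_char T p.1 p.2 (by omega)).mpr heq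
    rw [if_pos ⟨hd, by omega, by omega⟩, ← hy]

theorem mem_specA (n T : Int) (p : Int × Int) :
    p ∈ specA n T ↔ 1 ≤ p.1 ∧ p.1 ≤ n ∧ (p.1 + 1) * (p.2 + 1) = T + 1 ∧ p.2 < n := by
  unfold specA
  rw [List.mem_filterMap]
  constructor
  · rintro ⟨x, hx, hfx⟩
    rw [PySem.List.mem_pyRange_one] at hx
    split_ifs at hfx with hc
    · obtain ⟨h1, h2⟩ := hc
      cases hfx
      have heq := (div_char T x (yOf T x) (by omega)).mp ⟨h1, rfl⟩
      exact ⟨by omega, by omega, heq, h2⟩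
  · rintro ⟨h1, h2, heq, h3⟩
    refine ⟨p.1, PySem.List.mem_pyRange_one.mpr ⟨h1, by omega⟩, ?_⟩
    obtain ⟨hd, hy⟩ := (div_char T p.1 p.2 (by omega)).mpr heq
    rw [if_pos ⟨hd, by omega⟩, ← hy]

theorem pairwise_fst_pairsIn (T a b : Int) :
    (pairsIn T a b).Pairwise (fun p q => p.1 < q.1) := by
  unfold pairsIn
  rw [List.pairwise_filterMap]
  refine (PySem.List.pairwise_lt_pyRange_one a (b+1)).imp ?_
  intro x x' hlt p hp q hq
  split_ifs at hp hq
  cases hp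
  cases hq
  exact hlt

theorem pairwise_fst_specA (n T : Int) :
    (specA n T).Pairwise (fun p q => p.1 < q.1) := by
  unfold specA
  rw [List.pairwise_filterMap]
  refine (PySem.List.pairwise_lt_pyRange_one 1 (n+1)).imp ?_
  intro x x' hlt p hp q hq
  split_ifs at hp hq
  cases hp
  cases hq
  exact hlt

theorem pairwise2_pairsIn (T a b : Int) (ha : 1 ≤ a) (hT : 0 ≤ T) :
    (pairsIn T a b).Pairwise (fun p q => p.1 < q.1 ∧ q.2 < p.2) := by
  refine (pairwise_fst_pairsIn T a b).imp_of_mem ?_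
  intro p q hp hq hlt
  obtain ⟨hp1, hpeq, -, -⟩ := (mem_pairsIn T a b ha p).mp hp
  obtain ⟨hq1, hqeq, -, -⟩ := (mem_pairsIn T a b ha q).mp hq
  exact ⟨hlt, y_mono T p.1 p.2 q.1 q.2 (by omega) hT hlt hpeq hqeq⟩

theorem specA_eq_append (n : Int) (hn : 2 ≤ n) :
    specA n (n * (n + 1) / 2) =
      pairsIn (n * (n + 1) / 2) 1 n ++
        (((pairsIn (n * (n + 1) / 2) 1 n).reverse.filter (fun p => p.1 ≠ p.2)).map
          (fun p => (p.2, p.1))) := by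
  set T : Int := n * (n + 1) / 2 with hTdef
  have hTn : 2 * T = n * (n + 1) := by
    obtain ⟨r, hr⟩ := Int.even_mul_succ_self n
    rw [hTdef]
    generalize n * (n + 1) = m at hr ⊢
    omega
  have hT : 0 ≤ T := by nlinarith
  set L : List (Int × Int) := pairsIn T 1 n with hL
  set M : List (Int × Int) := (L.reverse.filter (fun p => p.1 ≠ p.2)).map (fun p => (p.2, p.1)) with hM
  have hmemM : ∀ p : Int × Int, p ∈ M ↔
      1 ≤ p.2 ∧ (p.2 + 1) * (p.1 + 1) = T + 1 ∧ p.2 < p.1 ∧ p.1 ≤ n := by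
    intro p
    rw [hM]
    simp only [List.mem_map, List.mem_filter, List.mem_reverse, decide_eq_true_eq]
    constructor
    · rintro ⟨q, ⟨hqL, hne⟩, rfl⟩
      obtain ⟨hq1, hqeq, hq2, hq3⟩ := (mem_pairsIn T 1 n le_rfl q).mp hqL
      exact ⟨hq1, hqeq, by omega, hq3⟩
    · rintro ⟨h1, heq, h2, h3⟩
      refine ⟨(p.2, p.1), ⟨(mem_pairsIn T 1 n le_rfl _).mpr ⟨h1, heq, by omega, h3⟩, by simp; omega⟩, by simp⟩
  have hpwL : L.Pairwise (fun p q => p.1 < q.1) := pairwise_fst_pairsIn T 1 n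
  have hpwM : M.Pairwise (fun p q => p.1 < q.1) := by
    rw [hM, List.pairwise_map]
    exact ((List.pairwise_reverse.mpr (pairwise2_pairsIn T 1 n le_rfl hT)).filter _).imp
      (fun h => h.2)
  have hcross : ∀ p ∈ L, ∀ q ∈ M, p.1 < q.1 := by
    intro p hp q hq
    obtain ⟨hp1, hpeq, hp2, hp3⟩ := (mem_pairsIn T 1 n le_rfl p).mp hp
    obtain ⟨hq1, hqeq, hq2, hq3⟩ := (hmemM q).mp hq
    by_contra hcon
    rw [not_lt] at hcon
    nlinarith
  have hpwLM : (L ++ M).Pairwise (fun p q => p.1 < q.1) :=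
    List.pairwise_append.mpr ⟨hpwL, hpwM, hcross⟩
  have hndLM : (L ++ M).Nodup :=
    hpwLM.imp (fun h => by intro he; rw [he] at h; exact lt_irrefl _ h)
  have hndS : (specA n T).Nodup :=
    (pairwise_fst_specA n T).imp (fun h => by intro he; rw [he] at h; exact lt_irrefl _ h)
  have hmem : ∀ p : Int × Int, p ∈ specA n T ↔ p ∈ L ++ M := by
    intro p
    rw [List.mem_append, mem_specA n T p, mem_pairsIn T 1 n le_rfl p, hmemM p]
    constructor
    · rintro ⟨h1, h2, heq, h3⟩
      have hp2 : 0 ≤ p.2 := y_nonneg T p.1 p.2 h1 hT heq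
      by_cases hle : p.1 ≤ p.2
      · exact Or.inl ⟨h1, heq, hle, by omega⟩
      · rw [not_le] at hle
        refine Or.inr ⟨?_, by linear_combination heq, hle, h2⟩
        by_contra hcon
        have hp20 : p.2 = 0 := by omega
        rw [hp20] at heq
        have hpT : p.1 = T := by linarith
        nlinarith
    · rintro (⟨h1, heq, hle, hb⟩ | ⟨h1, heq, hlt, hn'⟩)
      · refine ⟨h1, by omega, heq, ?_⟩
        by_contra hcon
        have hpn : p.2 = n := by omega
        rw [hpn] at heq
        have key : (n + 1) * (2 * p.1 + 2 - n) = 2 := by linear_combination 2 * heq + hTn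
        by_cases hm : 2 * p.1 + 2 - n ≤ 0
        · nlinarith
        · rw [not_le] at hm
          nlinarith
      · exact ⟨by omega, hn', by linear_combination heq, by omega⟩
  exact List.Perm.eq_of_pairwise
    (fun a b _ _ h1 h2 => by omega)
    (pairwise_fst_specA n T) hpwLM
    ((List.perm_ext_iff_of_nodup hndS hndLM).mpr hmem)

theorem twoPtrB_eq_pairsIn (T : Int) (hT : 0 ≤ T) (a b : Int) (ha : 1 ≤ a) :
    twoPtrB T a b = pairsIn T a b := twoPtr_eq T hT (b + 1 - a).toNat a b ha le_rfl

theorem alt_eq (n : Int) (hn : 1 ≤ n) :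
    removNb2_alt n = pairsIn (n * (n + 1) / 2) 1 n ++
      (((pairsIn (n * (n + 1) / 2) 1 n).reverse.filter (fun p => p.1 ≠ p.2)).map
        (fun p => (p.2, p.1))) := by
  have hT0 : 0 ≤ n * (n + 1) / 2 := Int.ediv_nonneg (by nlinarith) (by norm_num)
  simp only [removNb2_alt]
  rw [PySem.Int.floordiv_eq_ediv_of_pos (by norm_num : (0:Int) < 2)]
  rw [twoPtrB_eq_pairsIn _ hT0 1 n le_rfl]

theorem both_nil (n : Int) (hn : n ≤ 0) : removNb2 n = [] ∧ removNb2_alt n = [] := by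
  constructor
  · simp only [removNb2]
    rw [PySem.List.pyRange_one_eq_nil (by omega)]
    rfl
  · simp only [removNb2_alt]
    rw [twoPtrB, dif_neg (by omega : ¬ (1:Int) ≤ n)]
    rfl

theorem main_eq (n : Int) (hn : 2 ≤ n) : removNb2 n = removNb2_alt n := by
  rw [removNb2_eq_specA n (by omega), alt_eq n (by omega), specA_eq_append n hn]

theorem removNb2_at_one : removNb2 1 = [(1, 0)] := by decide

theorem removNb2_alt_at_one : removNb2_alt 1 = [] := by
  rw [alt_eq 1 le_rfl]; decide

-- ===== VERDICT (by name: the statement is the Claim_ definition above) =====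
theorem removNb2_spec : Claim_unchanged_removNb2 := by
  intro n _
  unfold Spec_removNb2 D_removNb2
  intro hD
  by_cases h : n ≤ 0
  · obtain ⟨h1, h2⟩ := both_nil n h
    rw [h1, h2]
  · exact main_eq n (by omega)

theorem removNb2_changed : Claim_changed_removNb2 := by
  unfold Claim_changed_removNb2
  exact ⟨by decide, by decide, removNb2_at_one, removNb2_alt_at_one, by decide⟩

theorem removNb2_tight : Claim_exact_removNb2 := by
  intro n _ hD
  unfold D_removNb2 at hD
  subst hD
  rw [removNb2_at_one, removNb2_alt_at_one]
  decide
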